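-- pv_equiv track=rewrite | github.com/wei2912/idc | nibble_aes/find_dist/create_dist.py | last_round
-- ===== SOURCE A (Python) =====
-- def last_round(end):
--     bs = [end >> (15 - i) & 0x1 for i in range(16)]
--
--     tmp = bs[1]
--     bs[1] = bs[5]
--     bs[5] = bs[9]
--     bs[9] = bs[13]
--     bs[13] = tmp
--
--     tmp = bs[2]
--     bs[2] = bs[10]
--     bs[10] = tmp
--
--     tmp = bs[6]
--     bs[6] = bs[14]
--     bs[14] = tmp
--
--     tmp = bs[3]
--     bs[3] = bs[15]
--     bs[15] = bs[11]
--     bs[11] = bs[7]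
--     bs[7] = tmp
--
--     return int("".join(str(b) for b in bs), 2)
-- ===== SOURCE B (Python) =====
-- # Table-driven bit shuffle: position j of the result takes original bit _PERM[j].
-- _PERM = (0, 5, 10, 15, 4, 9, 14, 3, 8, 13, 2, 7, 12, 1, 6, 11)
--
-- def last_round(end):
--     result = 0
--     for src in _PERM:
--         result = result * 2 + (end >> (15 - src) & 0x1)
--     return result
-- ===== Notes on version B (the rewrite author's own statement) =====
-- stated objective: idiomatic
-- what changed: Replaces the bit-list, the hand-written swap cycles and the binary-string join/parse round-trip with a single fold over a precomputed source-index permutation table that accumulates the result arithmetically.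
import Mathlib
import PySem

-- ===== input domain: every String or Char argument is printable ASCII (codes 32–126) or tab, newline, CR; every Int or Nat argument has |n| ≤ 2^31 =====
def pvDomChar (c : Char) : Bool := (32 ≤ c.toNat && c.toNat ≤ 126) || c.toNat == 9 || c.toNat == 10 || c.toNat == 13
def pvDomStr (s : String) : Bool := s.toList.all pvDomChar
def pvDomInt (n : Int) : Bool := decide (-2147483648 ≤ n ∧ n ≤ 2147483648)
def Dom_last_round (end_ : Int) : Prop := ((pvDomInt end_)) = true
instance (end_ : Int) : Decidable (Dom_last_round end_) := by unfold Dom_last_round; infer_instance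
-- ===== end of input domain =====

-- B replaces A's bit-list swap cycles and binary-string round-trip with a single
-- fold over a precomputed source-index table (idiomatic table-driven bit shuffle).

-- ===== PORT A =====
-- hand port of Python's int(s, 2); exact for nonempty strings of '0'/'1' digits,
-- the only strings A ever builds
def pyParseBin (s : String) : Int :=
  s.toList.foldl (fun a c => a * 2 + ((c.toNat : Int) - 48)) 0

def last_round (end_ : Int) : Int :=
  -- i runs over range(16), so 15 - i is the Python shift amount (never negative)
  let bs := (List.range 16).map (fun i => PySem.Int.band (end_ >>> (15 - i)) 1)
  let tmp := bs.getD 1 0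
  let bs := bs.set 1 (bs.getD 5 0)
  let bs := bs.set 5 (bs.getD 9 0)
  let bs := bs.set 9 (bs.getD 13 0)
  let bs := bs.set 13 tmp
  let tmp := bs.getD 2 0
  let bs := bs.set 2 (bs.getD 10 0)
  let bs := bs.set 10 tmp
  let tmp := bs.getD 6 0
  let bs := bs.set 6 (bs.getD 14 0)
  let bs := bs.set 14 tmp
  let tmp := bs.getD 3 0
  let bs := bs.set 3 (bs.getD 15 0)
  let bs := bs.set 15 (bs.getD 11 0)
  let bs := bs.set 11 (bs.getD 7 0)
  let bs := bs.set 7 tmp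
  pyParseBin (String.join (bs.map PySem.Int.toStr))

-- ===== PORT B =====
def permTable : List Nat := [0, 5, 10, 15, 4, 9, 14, 3, 8, 13, 2, 7, 12, 1, 6, 11]

def last_round_alt (end_ : Int) : Int :=
  permTable.foldl (fun result src => result * 2 + PySem.Int.band (end_ >>> (15 - src)) 1) 0

-- ===== PRECONDITION & SPEC =====
def Spec_last_round (end_ : Int) (out : Int) : Prop := out = last_round_alt end_
instance (end_ : Int) (out : Int) : Decidable (Spec_last_round end_ out) := by unfold Spec_last_round; infer_instance

-- ===== CLAIM (what is proved, stated in full; the proofs are below) =====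
def Claim_equal_last_round : Prop := ∀ (end_ : Int), Dom_last_round end_ → Spec_last_round end_ (last_round end_)

-- ===== LEMMAS AND PROOFS =====
theorem pv_band_one (m : Int) : PySem.Int.band m 1 = 0 ∨ PySem.Int.band m 1 = 1 := by
  rcases m with m | m <;> simp [PySem.Int.band] <;> omega

theorem pv_join_toList (a : String) (ss : List String) :
    (ss.foldl (· ++ ·) a).toList = a.toList ++ (ss.map String.toList).flatten := by
  induction ss generalizing a with
  | nil => simp
  | cons s ss ih => simp [ih, String.toList_append]

-- parsing the joined binary digits of a 0/1 list is the base-2 accumulation fold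
theorem pv_parse_join (bs : List Int) (h : ∀ b ∈ bs, b = 0 ∨ b = 1) :
    pyParseBin (String.join (bs.map PySem.Int.toStr)) =
      bs.foldl (fun a b => a * 2 + b) 0 := by
  unfold pyParseBin String.join
  rw [pv_join_toList]
  suffices H : ∀ (a : Int),
      List.foldl (fun a c => a * 2 + ((c.toNat : Int) - 48)) a
        (((bs.map PySem.Int.toStr).map String.toList).flatten) =
      bs.foldl (fun a b => a * 2 + b) a by
    simpa using H 0
  induction bs with
  | nil => intro a; simp
  | cons b bs ih =>
    intro a
    have hb := h b (List.mem_cons_self ..)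
    have hrest : ∀ x ∈ bs, x = 0 ∨ x = 1 := fun x hx => h x (List.mem_cons_of_mem _ hx)
    have ih' := ih hrest
    rcases hb with hb | hb <;> subst hb
    · rw [List.map_cons, List.map_cons, List.flatten_cons,
        show (PySem.Int.toStr 0).toList = ['0'] from by decide]
      simp only [List.foldl_append, List.foldl_cons,
        show (('0'.toNat : Int) - 48) = 0 from by decide, add_zero, ← List.map_map]
      exact ih' _
    · rw [List.map_cons, List.map_cons, List.flatten_cons,
        show (PySem.Int.toStr 1).toList = ['1'] from by decide]
      simp only [List.foldl_append, List.foldl_cons,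
        show (('1'.toNat : Int) - 48) = 1 from by decide, ← List.map_map]
      exact ih' _

-- ===== VERDICT (by name: the statement is the Claim_ definition above) =====
theorem last_round_spec : Claim_equal_last_round := by
  intro end_ _
  unfold Spec_last_round
  have hA : last_round end_ = pyParseBin (String.join (([PySem.Int.band (end_ >>> (15 - 0)) 1,
      PySem.Int.band (end_ >>> (15 - 5)) 1,
      PySem.Int.band (end_ >>> (15 - 10)) 1,
      PySem.Int.band (end_ >>> (15 - 15)) 1,
      PySem.Int.band (end_ >>> (15 - 4)) 1,
      PySem.Int.band (end_ >>> (15 - 9)) 1,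
      PySem.Int.band (end_ >>> (15 - 14)) 1,
      PySem.Int.band (end_ >>> (15 - 3)) 1,
      PySem.Int.band (end_ >>> (15 - 8)) 1,
      PySem.Int.band (end_ >>> (15 - 13)) 1,
      PySem.Int.band (end_ >>> (15 - 2)) 1,
      PySem.Int.band (end_ >>> (15 - 7)) 1,
      PySem.Int.band (end_ >>> (15 - 12)) 1,
      PySem.Int.band (end_ >>> (15 - 1)) 1,
      PySem.Int.band (end_ >>> (15 - 6)) 1,
      PySem.Int.band (end_ >>> (15 - 11)) 1] : List Int).map PySem.Int.toStr)) := rfl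
  rw [hA, pv_parse_join]
  · rfl
  · intro b hb
    simp only [List.mem_cons, List.not_mem_nil, or_false] at hb
    rcases hb with h|h|h|h|h|h|h|h|h|h|h|h|h|h|h|h <;> subst h <;> exact pv_band_one _
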